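-- pv_equiv track=rewrite | github.com/bugds/BashGATK | scripts/go_csv_qgen.py | parseVepColumns
-- ===== SOURCE A (Python) =====
-- innerDelimeter = ','
--
-- def parseVepColumns(varDict, vepList, delimeter=innerDelimeter):
--     vepData = varDict['INFO'].split(';')[-1].replace('CSQ=', '').split(',')
--     varDict.pop('INFO')
--     for vepChunk in vepData:
--         vepChunk = vepChunk.split('|')
--         for i in range(0, len(vepChunk)):
--             if vepChunk[i] == '':
--                 vepChunk[i] = '.'
--         for i in zip(vepList, vepChunk):
--             if ('INFO_VEP_' + i[0]) in varDict:
--                 varDict['INFO_VEP_' + i[0]] += delimeter + i[1]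
--             else:
--                 varDict['INFO_VEP_' + i[0]] = i[1]
--     return varDict
-- ===== SOURCE B (Python) =====
-- innerDelimeter = ','
--
-- def parseVepColumns(varDict, vepList, delimeter=innerDelimeter):
--     # Column-wise (transposed) traversal: split all CSQ chunks once, then build each
--     # output key's joined value in a single pass over its column.
--     info = varDict.pop('INFO')
--     rows = [c.split('|') for c in info.split(';')[-1].replace('CSQ=', '').split(',')]
--     for j, name in enumerate(vepList):
--         col = [r[j] if r[j] != '' else '.' for r in rows if j < len(r)]
--         if col:
--             varDict['INFO_VEP_' + name] = delimeter.join(col)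
--     return varDict
-- ===== Notes on version B (the rewrite author's own statement) =====
-- stated objective: alternative
-- what changed: B transposes the traversal: it splits all CSQ chunks into rows once, then for each VEP column name builds that column's joined value in one comprehension over the rows, instead of A's row-wise zip loop that repeatedly tests dict membership and grows each entry's string chunk by chunk.
import Mathlib
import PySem

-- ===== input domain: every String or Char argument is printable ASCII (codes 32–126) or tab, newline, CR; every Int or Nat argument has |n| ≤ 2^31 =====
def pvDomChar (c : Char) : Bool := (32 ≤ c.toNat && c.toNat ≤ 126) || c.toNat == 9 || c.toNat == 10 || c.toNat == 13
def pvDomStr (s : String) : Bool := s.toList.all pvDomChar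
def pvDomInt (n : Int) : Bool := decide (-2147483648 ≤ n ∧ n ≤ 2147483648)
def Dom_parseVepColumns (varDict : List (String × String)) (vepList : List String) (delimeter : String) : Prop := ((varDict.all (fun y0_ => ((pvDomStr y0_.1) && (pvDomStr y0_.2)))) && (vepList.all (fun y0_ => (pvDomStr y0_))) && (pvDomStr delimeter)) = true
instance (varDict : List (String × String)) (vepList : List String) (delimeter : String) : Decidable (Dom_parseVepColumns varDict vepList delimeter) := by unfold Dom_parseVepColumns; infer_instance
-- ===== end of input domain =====

-- B traverses the CSQ data COLUMN-WISE (one pass per VEP field name over all pre-split chunks,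
-- joining that column once) instead of A's chunk-wise loop that grows each dict entry's string;
-- both Pythons mutate varDict in place (pop 'INFO', add 'INFO_VEP_*' keys) identically — the
-- theorems below are about the returned dict.

-- s.split(sep) for the non-empty literal separators used here (split? is none only for sep = "")
def pvSplit (s sep : String) : List String := (PySem.Str.split? s sep).getD []

-- longest chunk length (number of columns the CSQ data actually carries)
def pvMaxLen (rs : List (List String)) : Nat := (rs.map List.length).foldr max 0

-- body of A's innermost 'for i in zip(vepList, vepChunk)' loop
def pvStepA (delimeter : String) (d : PySem.Dict String String) (i : String × String) : PySem.Dict String String :=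
  if d.contains ("INFO_VEP_" ++ i.1) then
    d.insert ("INFO_VEP_" ++ i.1) (d.getD ("INFO_VEP_" ++ i.1) "" ++ delimeter ++ i.2)
  else
    d.insert ("INFO_VEP_" ++ i.1) i.2

-- ===== PORT A =====
def parseVepColumns (varDict : List (String × String)) (vepList : List String) (delimeter : String) : List (String × String) :=
  let d := PySem.Dict.ofList varDict
  match d.get? "INFO" with
  | none => []  -- varDict['INFO'] raises KeyError: excluded by Pre_
  | some info =>
    let d := d.erase "INFO"  -- varDict.pop('INFO')
    let vepData := pvSplit (PySem.Str.replace (PySem.List.pyGetD (pvSplit info ";") (-1) "") "CSQ=" "") ","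
    (vepData.foldl (fun (d : PySem.Dict String String) vepChunk =>
      let vc := pvSplit vepChunk "|"
      let vc := (PySem.List.pyRange 0 (PySem.List.len vc) 1).foldl
        (fun vc i => if PySem.List.pyGetD vc i "" = "" then PySem.List.pySetD vc i "." else vc) vc
      (vepList.zip vc).foldl (pvStepA delimeter) d) d).items

-- ===== PORT B =====
def parseVepColumns_alt (varDict : List (String × String)) (vepList : List String) (delimeter : String) : List (String × String) :=
  let d := PySem.Dict.ofList varDict
  match d.get? "INFO" with
  | none => []  -- varDict.pop('INFO') raises KeyError: excluded by Pre_
  | some info =>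
    let base := d.erase "INFO"
    let rows := (pvSplit (PySem.Str.replace (PySem.List.pyGetD (pvSplit info ";") (-1) "") "CSQ=" "") ",").map
      (fun c => pvSplit c "|")
    -- for j, name in enumerate(vepList): col = [r[j] if r[j] != '' else '.' for r in rows if j < len(r)]
    -- (the guard 'j < len(r)' followed by r[j] is exactly getElem? at the Nat index j)
    ((PySem.List.enumerate vepList).foldl (fun (d : PySem.Dict String String) p =>
        let col := rows.filterMap (fun r => (r[p.1.toNat]?).map (fun f => if f ≠ "" then f else "."))
        if col = [] then d else d.insert ("INFO_VEP_" ++ p.2) (PySem.Str.join delimeter col)) base).items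

-- ===== PRECONDITION & SPEC =====
-- the VEP column names that actually receive a value: vepList truncated at the widest CSQ chunk
def pvOccurringNames (varDict : List (String × String)) (vepList : List String) : List String :=
  vepList.take (pvMaxLen ((pvSplit (PySem.Str.replace
    (PySem.List.pyGetD (pvSplit ((PySem.Dict.ofList varDict).getD "INFO" "") ";") (-1) "")
    "CSQ=" "") ",").map (fun c => pvSplit c "|")))

-- Pre_ requires the 'INFO' key (without it both Pythons raise KeyError), and excludes two corners
-- on which A still returns a value but whose behaviour is accidental: a varDict already holding
-- an 'INFO_VEP_'+name key for a column name that actually occurs (an output-namespace collision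
-- no caller of this VCF-row parser produces: A concatenates the new CSQ values onto the stale
-- value, B overwrites it), and a vepList naming two actually occurring columns identically
-- (A's per-chunk interleaving under the shared key is as arbitrary as B's last-column-wins).
def Pre_parseVepColumns (varDict : List (String × String)) (vepList : List String) (delimeter : String) : Prop :=
  "INFO" ∈ varDict.map Prod.fst ∧ (pvOccurringNames varDict vepList).Nodup ∧
    ∀ n ∈ pvOccurringNames varDict vepList, ("INFO_VEP_" ++ n) ∉ varDict.map Prod.fst
instance (varDict : List (String × String)) (vepList : List String) (delimeter : String) : Decidable (Pre_parseVepColumns varDict vepList delimeter) := by unfold Pre_parseVepColumns; infer_instance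

def pvWitness_parseVepColumns : (List (String × String)) × List String × String :=
  ([("CHROM", "1"), ("INFO", "DP=9;CSQ=G|1|,T||x")], ["Gene", "Pos", "Ref"], ",")

def Spec_parseVepColumns (varDict : List (String × String)) (vepList : List String) (delimeter : String) (out : List (String × String)) : Prop := out = parseVepColumns_alt varDict vepList delimeter
instance (varDict : List (String × String)) (vepList : List String) (delimeter : String) (out : List (String × String)) : Decidable (Spec_parseVepColumns varDict vepList delimeter out) := by unfold Spec_parseVepColumns; infer_instance

-- ===== CLAIM (what is proved, stated in full; the proofs are below) =====
def Claim_equal_parseVepColumns : Prop := ∀ (varDict : List (String × String)) (vepList : List String) (delimeter : String), Dom_parseVepColumns varDict vepList delimeter → Pre_parseVepColumns varDict vepList delimeter → Spec_parseVepColumns varDict vepList delimeter (parseVepColumns varDict vepList delimeter)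

-- ===== LEMMAS AND PROOFS =====

def pvKey (n : String) : String := "INFO_VEP_" ++ n

lemma pvKey_inj {a b : String} (h : pvKey a = pvKey b) : a = b := by
  have : ("INFO_VEP_" ++ a).toList = ("INFO_VEP_" ++ b).toList := congrArg String.toList h
  simp only [String.toList_append, List.append_cancel_left_eq] at this
  exact String.toList_injective this

lemma pvJoin_single (d x : String) : PySem.Str.join d [x] = x := by
  simp [PySem.Str.join, PySem.Chars.join, List.intercalate, String.ofList_toList]

-- A's in-place '' → '.' loop is B's map
lemma pvFixLoop : ∀ (l pre : List String),
    (PySem.List.pyRange (pre.length : Int) ((pre.length + l.length : Nat) : Int) 1).foldl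
      (fun vc i => if PySem.List.pyGetD vc i "" = "" then PySem.List.pySetD vc i "." else vc) (pre ++ l)
    = pre ++ l.map (fun f => if f ≠ "" then f else ".") := by
  intro l
  induction l with
  | nil => intro pre; simp [PySem.List.pyRange]
  | cons x t ih =>
    intro pre
    have hlt : (pre.length : Int) < ((pre.length + (x :: t).length : Nat) : Int) := by
      simp
    rw [PySem.List.pyRange_one_cons hlt, List.foldl_cons]
    have hget : PySem.List.pyGetD (pre ++ x :: t) (pre.length : Int) "" = x := by
      simp [PySem.List.pyGetD_natCast, List.getD]
    have hstep : (if PySem.List.pyGetD (pre ++ x :: t) (pre.length : Int) "" = ""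
        then PySem.List.pySetD (pre ++ x :: t) (pre.length : Int) "." else pre ++ x :: t)
        = pre ++ (if x ≠ "" then x else ".") :: t := by
      rw [hget]
      by_cases hx : x = ""
      · rw [if_pos hx, if_neg (by simp [hx])]
        simp [PySem.List.pySetD_natCast]
      · rw [if_neg hx, if_pos hx]
    rw [hstep, show pre ++ (if x ≠ "" then x else ".") :: t = (pre ++ [if x ≠ "" then x else "."]) ++ t by simp,
      show ((pre.length : Int) + 1) = (((pre ++ [if x ≠ "" then x else "."]).length : Nat) : Int) by simp,
      show ((pre.length + (x :: t).length : Nat) : Int) = (((pre ++ [if x ≠ "" then x else "."]).length + t.length : Nat) : Int) by simp; omega,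
      ih (pre ++ [if x ≠ "" then x else "."])]
    simp

-- A's in-place fix of one chunk, specialised to the port's shape
lemma pvChunk (vc : List String) :
    (PySem.List.pyRange 0 (PySem.List.len vc) 1).foldl
      (fun vc i => if PySem.List.pyGetD vc i "" = "" then PySem.List.pySetD vc i "." else vc) vc
    = vc.map (fun f => if f ≠ "" then f else ".") := by
  have h := pvFixLoop vc []
  simpa [PySem.List.len_eq] using h

-- keys of the dict built from the input association list
lemma pvKeys_ofList (varDict : List (String × String)) :
    (PySem.Dict.ofList varDict).keys = PySem.Set.ofList (varDict.map Prod.fst) := by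
  have h := PySem.Dict.keys_foldl_insert_key varDict Prod.fst (fun _ p => p.2)
      (PySem.Dict.empty : PySem.Dict String String)
  simpa [PySem.Dict.ofList, PySem.Dict.update, PySem.Set.update_nil_left] using h

-- values accumulated for output key c by a pair list (A appends i.2 whenever 'INFO_VEP_'+i.1 = c)
def pvVals (c : String) (l : List (String × String)) : List String :=
  (l.filter (fun p => pvKey p.1 == c)).map Prod.snd

-- the optional-string accumulator A's branches implement at one key
def pvJoinOnto (δ : String) (o : Option String) (vs : List String) : Option String :=
  vs.foldl (fun o v => some (match o with | none => v | some s => s ++ δ ++ v)) o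

lemma pvJoinOnto_append (δ : String) (o : Option String) (vs ws : List String) :
    pvJoinOnto δ o (vs ++ ws) = pvJoinOnto δ (pvJoinOnto δ o vs) ws :=
  List.foldl_append

-- A's branchy step is one insert at the key 'INFO_VEP_' + i.1
lemma pvStepA_eq (δ : String) (d : PySem.Dict String String) (i : String × String) :
    pvStepA δ d i
      = d.insert (pvKey i.1)
          (if d.contains (pvKey i.1) then d.getD (pvKey i.1) "" ++ δ ++ i.2 else i.2) := by
  unfold pvStepA pvKey
  split_ifs <;> rfl

-- lookup after A's inner zip loop
lemma pvGet_inner (δ : String) :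
    ∀ (l : List (String × String)) (d : PySem.Dict String String) (c : String),
    (l.foldl (pvStepA δ) d).get? c = pvJoinOnto δ (d.get? c) (pvVals c l) := by
  intro l
  induction l with
  | nil => intro d c; rfl
  | cons p t ih =>
    intro d c
    rw [List.foldl_cons, ih, pvStepA_eq]
    by_cases hc : c = pvKey p.1
    · subst hc
      have hv : pvVals (pvKey p.1) (p :: t) = p.2 :: pvVals (pvKey p.1) t := by
        simp [pvVals]
      rw [hv, PySem.Dict.get?_insert_self]
      have : pvJoinOnto δ (d.get? (pvKey p.1)) (p.2 :: pvVals (pvKey p.1) t)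
          = pvJoinOnto δ (some (match d.get? (pvKey p.1) with
              | none => p.2 | some s => s ++ δ ++ p.2)) (pvVals (pvKey p.1) t) := rfl
      rw [this]
      congr 1
      rw [PySem.Dict.contains_eq_isSome_get?, PySem.Dict.getD_eq_get?_getD]
      cases d.get? (pvKey p.1) <;> rfl
    · have hv : pvVals c (p :: t) = pvVals c t := by
        simp only [pvVals, List.filter_cons]
        have : (pvKey p.1 == c) = false := by
          simp only [beq_eq_false_iff_ne, ne_eq]
          exact fun h => hc h.symm
        simp [this]
      rw [hv, PySem.Dict.get?_insert_of_ne _ _ hc]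

-- lookup after A's whole chunk loop
lemma pvGet_rows (δ : String) (vl : List String) :
    ∀ (rs : List (List String)) (d : PySem.Dict String String) (c : String),
    (rs.foldl (fun d r => (vl.zip r).foldl (pvStepA δ) d) d).get? c
      = pvJoinOnto δ (d.get? c) (rs.flatMap (fun r => pvVals c (vl.zip r))) := by
  intro rs
  induction rs with
  | nil => intro d c; rfl
  | cons r t ih =>
    intro d c
    rw [List.foldl_cons, ih, List.flatMap_cons, pvJoinOnto_append, pvGet_inner]

-- δ.join(s :: v :: vs) merges its first two parts
lemma pvJoin_cons_merge (δ s v : String) (vs : List String) :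
    PySem.Str.join δ (s :: v :: vs) = PySem.Str.join δ ((s ++ δ ++ v) :: vs) := by
  simp only [PySem.Str.join, PySem.Chars.join, List.map_cons, List.intercalate,
    List.intersperse, List.flatten_cons]
  cases vs <;> simp [String.toList_append, List.append_assoc]

lemma pvJoinOnto_some (δ s : String) :
    ∀ (vs : List String), pvJoinOnto δ (some s) vs = some (PySem.Str.join δ (s :: vs)) := by
  intro vs
  induction vs generalizing s with
  | nil => simp [pvJoinOnto, pvJoin_single]
  | cons v t ih =>
    have h1 : pvJoinOnto δ (some s) (v :: t) = pvJoinOnto δ (some (s ++ δ ++ v)) t := rfl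
    rw [h1, ih, pvJoin_cons_merge]

lemma pvJoinOnto_none (δ : String) (vs : List String) :
    pvJoinOnto δ none vs = if vs = [] then none else some (PySem.Str.join δ vs) := by
  cases vs with
  | nil => rfl
  | cons v t =>
    have h1 : pvJoinOnto δ none (v :: t) = pvJoinOnto δ (some v) t := rfl
    rw [h1, pvJoinOnto_some]
    simp

-- a key no pair of the list maps to collects no values
lemma pvVals_other (c : String) (l : List (String × String))
    (h : ∀ p ∈ l, pvKey p.1 ≠ c) : pvVals c l = [] := by
  simp only [pvVals, List.map_eq_nil_iff, List.filter_eq_nil_iff]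
  intro p hp he
  exact h p hp (eq_of_beq he)

-- with distinct names, the zip pairs matching key j extract exactly field j
lemma pvVals_zip :
    ∀ (l : List String) (r : List String) (j : Nat) (hnd : l.Nodup) (hj : j < l.length),
    pvVals (pvKey l[j]) (l.zip r) = (r[j]?).toList := by
  intro l
  induction l with
  | nil => intro r j _ hj; simp at hj
  | cons a t ih =>
    intro r j hnd hj
    cases r with
    | nil => simp [pvVals]
    | cons b r' =>
      cases j with
      | zero =>
        have hrest : pvVals (pvKey a) (t.zip r') = [] := by
          simp only [pvVals, List.map_eq_nil_iff, List.filter_eq_nil_iff]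
          intro p hp
          have hfst : p.1 ∈ t := (List.of_mem_zip hp).1
          have hne : p.1 ≠ a := fun he => (List.nodup_cons.mp hnd).1 (he ▸ hfst)
          exact fun he => hne (pvKey_inj (eq_of_beq he))
        simp only [List.getElem_cons_zero, List.zip_cons_cons]
        simp only [pvVals, List.filter_cons, beq_self_eq_true, if_pos] at *
        simp at hrest ⊢
        exact hrest
      | succ j' =>
        have hj' : j' < t.length := by simpa using hj
        have hidx : (a :: t)[j' + 1] = t[j'] := rfl
        have hne : (pvKey a == pvKey t[j']) = false := by
          have : a ≠ t[j'] := by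
            intro he
            exact (List.nodup_cons.mp hnd).1 (he ▸ t.getElem_mem hj')
          simp only [beq_eq_false_iff_ne, ne_eq]
          exact fun he => this (pvKey_inj he)
        simp only [hidx, List.zip_cons_cons]
        have : pvVals (pvKey t[j']) ((a, b) :: t.zip r') = pvVals (pvKey t[j']) (t.zip r') := by
          simp [pvVals, hne]
        rw [this, ih r' j' (List.nodup_cons.mp hnd).2 hj']
        rfl

-- zipping against a row shorter than n only sees the first n names
lemma pvZip_take {α β : Type} : ∀ (l : List α) (r : List β) (n : Nat), r.length ≤ n →
    l.zip r = (l.take n).zip r := by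
  intro l
  induction l with
  | nil => intro r n _; simp
  | cons a t ih =>
    intro r n h
    cases r with
    | nil => simp
    | cons b r' =>
      cases n with
      | zero => simp at h
      | succ n' =>
        simp only [List.take_succ_cons, List.zip_cons_cons]
        rw [← ih r' n' (by simpa using h)]

lemma pvLen_le_maxLen (rs : List (List String)) (r : List String) (h : r ∈ rs) :
    r.length ≤ pvMaxLen rs := by
  induction rs with
  | nil => simp at h
  | cons a t ih =>
    simp only [pvMaxLen, List.map_cons, List.foldr_cons]
    rcases List.mem_cons.mp h with rfl | h'
    · omega
    · have := ih h'
      simp only [pvMaxLen] at this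
      omega

lemma pvMaxLen_map (f : String → String) (rs : List (List String)) :
    pvMaxLen (rs.map (List.map f)) = pvMaxLen rs := by
  simp [pvMaxLen, List.map_map, Function.comp_def]

-- the first components of a zip are a take
lemma pvMapFst_zip : ∀ (l : List String) (r : List String),
    (l.zip r).map Prod.fst = l.take r.length := by
  intro l
  induction l with
  | nil => intro r; simp
  | cons a t ih =>
    intro r
    cases r with
    | nil => simp
    | cons b r' => simp [ih r']

-- keys after A's inner zip loop
lemma pvKeys_inner (δ : String) (l : List String) (r : List String) (d : PySem.Dict String String) :
    ((l.zip r).foldl (pvStepA δ) d).keys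
      = PySem.Set.update d.keys ((l.take r.length).map pvKey) := by
  have hf : pvStepA δ = fun d (i : String × String) => d.insert (pvKey i.1)
      (if d.contains (pvKey i.1) then d.getD (pvKey i.1) "" ++ δ ++ i.2 else i.2) := by
    funext d i; exact pvStepA_eq δ d i
  rw [hf, PySem.Dict.keys_foldl_insert_key]
  congr 1
  rw [show (fun (i : String × String) => pvKey i.1) = pvKey ∘ Prod.fst from rfl,
    ← List.map_map, pvMapFst_zip]

-- keys after A's whole chunk loop
lemma pvKeys_rows (δ : String) (vl : List String) :
    ∀ (rs : List (List String)) (d : PySem.Dict String String),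
    (rs.foldl (fun d r => (vl.zip r).foldl (pvStepA δ) d) d).keys
      = PySem.Set.update d.keys (rs.flatMap (fun r => (vl.take r.length).map pvKey)) := by
  intro rs
  induction rs with
  | nil => intro d; simp [PySem.Set.update]
  | cons r t ih =>
    intro d
    rw [List.foldl_cons, ih, pvKeys_inner, List.flatMap_cons, PySem.Set.update_append]

-- new elements a longer prefix adds beyond a shorter one
lemma pvFilter_take : ∀ (vl : List String) (a b : Nat), vl.Nodup →
    (vl.take b).filter (fun x => !decide (x ∈ vl.take a)) = (vl.drop a).take (b - a) := by
  intro vl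
  induction vl with
  | nil => intro a b _; simp
  | cons v vs ih =>
    intro a b hnd
    cases a with
    | zero =>
      simp only [List.take_zero, List.drop_zero, Nat.sub_zero]
      simp
    | succ a' =>
      cases b with
      | zero => simp
      | succ b' =>
        simp only [List.take_succ_cons, List.drop_succ_cons, Nat.succ_sub_succ]
        rw [List.filter_cons, if_neg (by simp)]
        have hvnotin : v ∉ vs := (List.nodup_cons.mp hnd).1
        have hcong : ∀ x ∈ vs.take b',
            (!decide (x ∈ v :: vs.take a')) = (!decide (x ∈ vs.take a')) := by
          intro x hx
          have hxvs : x ∈ vs := List.mem_of_mem_take hx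
          have : x ≠ v := fun he => hvnotin (he ▸ hxvs)
          simp [List.mem_cons, this]
        exact (List.filter_congr hcong).trans (ih a' b' (List.nodup_cons.mp hnd).2)

lemma pvNodup_takeMap (vl : List String) (a : Nat) (hnd : vl.Nodup) :
    ((vl.take a).map pvKey).Nodup :=
  List.Nodup.map (fun _ _ h => pvKey_inj h) (hnd.sublist (List.take_sublist a vl))

-- updating with a key prefix extends the key block to the longer prefix
lemma pvUpdate_take (vl : List String) (hnd : vl.Nodup) (s : List String)
    (hs : ∀ x ∈ vl, pvKey x ∉ s) (a b : Nat) :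
    PySem.Set.update (s ++ (vl.take a).map pvKey) ((vl.take b).map pvKey)
      = s ++ (vl.take (max a b)).map pvKey := by
  rw [PySem.Set.update_eq_append_filter]
  rw [PySem.Set.ofList_eq_self_of_nodup _ (pvNodup_takeMap vl b hnd)]
  have hpred : ∀ x ∈ vl.take b,
      ((fun y => !(PySem.Set.contains (s ++ (vl.take a).map pvKey) y)) ∘ pvKey) x
        = (!decide (x ∈ vl.take a)) := by
    intro x hx
    have hns : pvKey x ∉ s := hs x (List.mem_of_mem_take hx)
    have h2 : pvKey x ∈ (vl.take a).map pvKey ↔ x ∈ vl.take a := by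
      constructor
      · intro h
        obtain ⟨y, hy, he⟩ := List.mem_map.mp h
        exact (pvKey_inj he.symm) ▸ hy
      · exact List.mem_map_of_mem
    have h2' : pvKey x ∈ List.take a (List.map pvKey vl) ↔ x ∈ vl.take a := by
      rw [← List.map_take]; exact h2
    simp [List.mem_append, hns, h2']
  rw [List.filter_map]
  have hfe : List.filter ((fun y => !(PySem.Set.contains (s ++ (vl.take a).map pvKey) y)) ∘ pvKey) (vl.take b)
      = (vl.drop a).take (b - a) := (List.filter_congr hpred).trans (pvFilter_take vl a b hnd)
  rw [hfe, List.append_assoc, ← List.map_append, ← List.take_add]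
  congr 3
  omega

-- column j over the (fixed) rows
def pvCols (rs : List (List String)) (j : Nat) : List String := rs.filterMap (fun r => r[j]?)

lemma pvCols_nil_iff (rs : List (List String)) (j : Nat) :
    pvCols rs j = [] ↔ pvMaxLen rs ≤ j := by
  induction rs with
  | nil => simp [pvCols, pvMaxLen]
  | cons r t ih =>
    simp only [pvCols, pvMaxLen, List.filterMap_cons, List.map_cons, List.foldr_cons] at *
    cases hr : r[j]? with
    | some v =>
      have hlt : j < r.length := (List.getElem?_eq_some_iff.mp hr).1
      simp only [Nat.max_le]
      constructor
      · intro h; exact absurd h (by simp)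
      · intro h; exact absurd hlt (by omega)
    | none =>
      rw [List.getElem?_eq_none_iff] at hr
      simp only [Nat.max_le]
      constructor
      · intro h; exact ⟨hr, ih.mp h⟩
      · intro h; exact ih.mpr h.2

-- A's final key list
lemma pvKeysA_final (vl : List String) (hnd : vl.Nodup) (s : List String)
    (hs : ∀ x ∈ vl, pvKey x ∉ s) :
    ∀ (rs : List (List String)) (a : Nat),
    PySem.Set.update (s ++ (vl.take a).map pvKey)
        (rs.flatMap (fun r => (vl.take r.length).map pvKey))
      = s ++ (vl.take (max a (pvMaxLen rs))).map pvKey := by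
  intro rs
  induction rs with
  | nil => intro a; simp [pvMaxLen, PySem.Set.update]
  | cons r t ih =>
    intro a
    rw [List.flatMap_cons, PySem.Set.update_append, pvUpdate_take vl hnd s hs, ih (max a r.length)]
    have hmx : max (max a r.length) (pvMaxLen t) = max a (pvMaxLen (r :: t)) := by
      simp only [pvMaxLen, List.map_cons, List.foldr_cons]
      omega
    rw [hmx]

def pvFix (f : String) : String := if f ≠ "" then f else "."

-- B's column comprehension over the raw rows is the column of the fixed rows
lemma pvColB (rows : List (List String)) (j : Nat) :
    rows.filterMap (fun r => (r[j]?).map pvFix) = pvCols (rows.map (List.map pvFix)) j := by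
  rw [pvCols, List.filterMap_map]
  apply List.filterMap_congr
  intro r _
  simp

-- a conditional-insert loop is the insert loop over the kept pairs
lemma pvSkipFold (l : List (Int × String)) (cf : Int × String → List String)
    (kf vf : Int × String → String) :
    ∀ (d : PySem.Dict String String),
    l.foldl (fun d p => if cf p = [] then d else d.insert (kf p) (vf p)) d
      = (l.filterMap (fun p => if cf p = [] then none else some (kf p, vf p))).foldl
          (fun d q => d.insert q.1 q.2) d := by
  induction l with
  | nil => intro d; rfl
  | cons p t ih =>
    intro d
    by_cases h : cf p = [] <;> simp [h, ih]

-- B's kept pairs are exactly one pair per column below the longest chunk length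
lemma pvPairs (vl : List String) (δ : String) (cf : Nat → List String) (M : Nat)
    (hM : ∀ j, cf j = [] ↔ M ≤ j) :
    (PySem.List.enumerate vl).filterMap (fun p =>
        if cf p.1.toNat = [] then none else some (pvKey p.2, PySem.Str.join δ (cf p.1.toNat)))
      = (PySem.List.enumerate (vl.take M)).map
          (fun p => (pvKey p.2, PySem.Str.join δ (cf p.1.toNat))) := by
  conv_lhs => rw [← List.take_append_drop M vl]
  rw [show PySem.List.enumerate (vl.take M ++ vl.drop M)
      = PySem.List.enumerate (vl.take M ++ vl.drop M) 0 from rfl,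
    PySem.List.enumerate_append, List.filterMap_append]
  have h1 : (PySem.List.enumerate (vl.take M) 0).filterMap (fun p =>
      if cf p.1.toNat = [] then none else some (pvKey p.2, PySem.Str.join δ (cf p.1.toNat)))
      = (PySem.List.enumerate (vl.take M) 0).map
          (fun p => (pvKey p.2, PySem.Str.join δ (cf p.1.toNat))) := by
    have hcong : ∀ p ∈ PySem.List.enumerate (vl.take M) 0,
        (if cf p.1.toNat = [] then none else some (pvKey p.2, PySem.Str.join δ (cf p.1.toNat)))
          = some (pvKey p.2, PySem.Str.join δ (cf p.1.toNat)) := by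
      intro p hp
      obtain ⟨k, hk, rfl⟩ := (PySem.List.mem_enumerate_iff _ _ _).mp hp
      have hkM : k < M := lt_of_lt_of_le hk (by simp [List.length_take])
      rw [if_neg]
      intro hc
      rw [hM] at hc
      simp at hc
      omega
    rw [List.filterMap_congr hcong,
      show (fun (p : Int × String) => some (pvKey p.2, PySem.Str.join δ (cf p.1.toNat)))
        = some ∘ (fun p => (pvKey p.2, PySem.Str.join δ (cf p.1.toNat))) from rfl,
      List.filterMap_eq_map]
  have h2 : (PySem.List.enumerate (vl.drop M) (0 + ((vl.take M).length : Int))).filterMap (fun p =>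
      if cf p.1.toNat = [] then none else some (pvKey p.2, PySem.Str.join δ (cf p.1.toNat)))
      = [] := by
    rw [List.filterMap_eq_nil_iff]
    intro p hp
    obtain ⟨k, hk, rfl⟩ := (PySem.List.mem_enumerate_iff _ _ _).mp hp
    have hlen : (vl.drop M).length = vl.length - M := List.length_drop
    have hMlt : M < vl.length := by omega
    have htk : (vl.take M).length = M := by simp [List.length_take]; omega
    rw [if_pos]
    rw [hM]
    simp [htk]
    omega
  rw [h1, h2, List.append_nil]

-- ===== VERDICT (by name: the statement is the Claim_ definition above) =====
set_option maxHeartbeats 1000000 in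
theorem parseVepColumns_spec : Claim_equal_parseVepColumns := by
  intro varDict vepList delimeter _hdom hpre
  obtain ⟨hinfo, hOccNodup, hOccFree⟩ := hpre
  unfold Spec_parseVepColumns parseVepColumns parseVepColumns_alt
  dsimp only
  have hct : (PySem.Dict.ofList varDict).contains "INFO" = true := by
    rw [PySem.Dict.contains_iff_mem_keys, pvKeys_ofList]
    exact (PySem.Set.mem_ofList _ _).mpr hinfo
  obtain ⟨info, hi⟩ : ∃ v, (PySem.Dict.ofList varDict).get? "INFO" = some v := by
    rw [PySem.Dict.contains_eq_isSome_get?] at hct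
    exact Option.isSome_iff_exists.mp hct
  rw [hi]
  dsimp only
  set base := (PySem.Dict.ofList varDict).erase "INFO" with hbdef
  have hbnodup : base.keys.Nodup := by
    have h0 : (PySem.Dict.ofList varDict).keys.Nodup := PySem.Dict.nodup_keys_ofList varDict
    simp only [hbdef, PySem.Dict.erase, PySem.Dict.keys] at *
    exact (List.Sublist.map _ List.filter_sublist).nodup h0
  set vepData := pvSplit (PySem.Str.replace (PySem.List.pyGetD (pvSplit info ";") (-1) "") "CSQ=" "") "," with hvdef
  -- normalise the '' → '.' lambda to pvFix
  simp only [show (fun f : String => if f ≠ "" then f else ".") = pvFix from rfl]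
  set rows' : List (List String) := vepData.map (fun c => (pvSplit c "|").map pvFix) with hrdef
  set M := pvMaxLen rows' with hMdef
  -- the Pre_ facts, expressed over the first M names
  have hgd : (PySem.Dict.ofList varDict).getD "INFO" "" = info := by
    rw [PySem.Dict.getD_eq_get?_getD, hi]
    rfl
  have hOcc : pvOccurringNames varDict vepList = vepList.take M := by
    rw [pvOccurringNames, hgd, ← hvdef, hMdef, hrdef,
      show vepData.map (fun c => (pvSplit c "|").map pvFix)
        = (vepData.map (fun c => pvSplit c "|")).map (List.map pvFix) by
          rw [List.map_map]; rfl,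
      pvMaxLen_map]
  have hndM : (vepList.take M).Nodup := hOcc ▸ hOccNodup
  have HF : ∀ n ∈ vepList.take M, pvKey n ∉ base.keys := by
    intro n hn hmem
    apply hOccFree n (hOcc ▸ hn)
    have h1 : pvKey n ∈ (PySem.Dict.ofList varDict).keys := by
      rw [hbdef] at hmem
      simp only [PySem.Dict.erase, PySem.Dict.keys, List.mem_map] at hmem ⊢
      obtain ⟨q, hq, he⟩ := hmem
      exact ⟨q, List.mem_of_mem_filter hq, he⟩
    rw [pvKeys_ofList] at h1
    exact (PySem.Set.mem_ofList _ _).mp h1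
  -- ===== A's side: rewrite the chunk loop to a fold over the fixed rows =====
  have hfunA : (fun (d : PySem.Dict String String) vepChunk =>
      let vc := pvSplit vepChunk "|"
      let vc := (PySem.List.pyRange 0 (PySem.List.len vc) 1).foldl
        (fun vc i => if PySem.List.pyGetD vc i "" = "" then PySem.List.pySetD vc i "." else vc) vc
      (vepList.zip vc).foldl (pvStepA delimeter) d)
      = (fun (d : PySem.Dict String String) c =>
        (vepList.zip ((pvSplit c "|").map pvFix)).foldl (pvStepA delimeter) d) := by
    funext d c
    simp only [pvChunk]
    rfl
  rw [hfunA, ← List.foldl_map (f := fun c => (pvSplit c "|").map pvFix)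
    (g := fun (d : PySem.Dict String String) r => (vepList.zip r).foldl (pvStepA delimeter) d), ← hrdef]
  -- only the first M names are ever zipped against a row
  have hrowlen : ∀ r ∈ rows', r.length ≤ M := by
    intro r hr
    rw [hMdef]
    exact pvLen_le_maxLen rows' r hr
  rw [PySem.List.foldl_congr_mem rows'
    (fun d r => (vepList.zip r).foldl (pvStepA delimeter) d)
    (fun d r => ((vepList.take M).zip r).foldl (pvStepA delimeter) d) base
    (fun d r hr => by
      show (vepList.zip r).foldl (pvStepA delimeter) d
        = ((vepList.take M).zip r).foldl (pvStepA delimeter) d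
      rw [← pvZip_take vepList r M (hrowlen r hr)])]
  set AD := rows'.foldl (fun d r => ((vepList.take M).zip r).foldl (pvStepA delimeter) d) base with hADdef
  clear_value AD M rows' vepData base
  have hkeysA : AD.keys = base.keys ++ (vepList.take M).map pvKey := by
    rw [hADdef, pvKeys_rows]
    have h0 := pvKeysA_final (vepList.take M) hndM base.keys HF rows' 0
    rw [← hMdef] at h0
    simpa [List.take_take] using h0
  have hkAnd : AD.keys.Nodup := by
    rw [hkeysA]
    refine List.Nodup.append hbnodup (hndM.map (fun _ _ h => pvKey_inj h)) ?_
    intro a ha hb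
    obtain ⟨y, hy, rfl⟩ := List.mem_map.mp hb
    exact HF y hy ha
  have hgetOld : ∀ k ∈ base.keys, AD.get? k = base.get? k := by
    intro k hk
    rw [hADdef, pvGet_rows]
    have hz : rows'.flatMap (fun r => pvVals k ((vepList.take M).zip r)) = [] := by
      rw [List.flatMap_eq_nil_iff]
      intro r _
      refine pvVals_other k _ ?_
      intro p hp he
      exact HF p.1 (List.of_mem_zip hp).1 (he ▸ hk)
    rw [hz]
    rfl
  have hgetNew : ∀ (t : Nat) (h1 : t < (vepList.take M).length),
      AD.get? (pvKey ((vepList.take M)[t]))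
        = some (PySem.Str.join delimeter (pvCols rows' t)) := by
    intro t h1
    have htM : t < M := by
      have := List.length_take_le M vepList
      omega
    rw [hADdef, pvGet_rows]
    have hb0 : base.get? (pvKey (vepList.take M)[t]) = none := by
      rw [PySem.Dict.get?_eq_none_iff_not_mem_keys]
      exact HF _ (List.getElem_mem h1)
    rw [hb0]
    have hcols : rows'.flatMap (fun r => pvVals (pvKey (vepList.take M)[t]) ((vepList.take M).zip r))
        = pvCols rows' t := by
      rw [pvCols, List.filterMap_eq_flatMap_toList]
      apply List.flatMap_congr
      intro r _
      exact pvVals_zip (vepList.take M) r t hndM h1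
    rw [hcols, pvJoinOnto_none, if_neg]
    intro hc
    rw [pvCols_nil_iff, ← hMdef] at hc
    omega
  -- ===== B's side: the skip-loop is an insert loop over one pair per kept column =====
  have hcolB : ∀ j : Nat, rows'.filterMap (fun r => r[j]?)
      = (vepData.map (fun c => pvSplit c "|")).filterMap (fun r => (r[j]?).map pvFix) := by
    intro j
    rw [pvColB, List.map_map, hrdef]
    rfl
  have hstepB : (fun (d : PySem.Dict String String) (p : Int × String) =>
      let col := (vepData.map (fun c => pvSplit c "|")).filterMap
        (fun r => (r[p.1.toNat]?).map pvFix)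
      if col = [] then d else d.insert ("INFO_VEP_" ++ p.2) (PySem.Str.join delimeter col))
      = (fun (d : PySem.Dict String String) (p : Int × String) =>
        if pvCols rows' p.1.toNat = [] then d
        else d.insert (pvKey p.2) (PySem.Str.join delimeter (pvCols rows' p.1.toNat))) := by
    funext d p
    show (if ((vepData.map (fun c => pvSplit c "|")).filterMap
        (fun r => (r[p.1.toNat]?).map pvFix)) = [] then d
      else d.insert ("INFO_VEP_" ++ p.2) (PySem.Str.join delimeter
        ((vepData.map (fun c => pvSplit c "|")).filterMap (fun r => (r[p.1.toNat]?).map pvFix)))) = _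
    rw [pvCols, hcolB p.1.toNat]
    rfl
  rw [hstepB, pvSkipFold _ (fun p => pvCols rows' p.1.toNat) (fun p => pvKey p.2)
    (fun p => PySem.Str.join delimeter (pvCols rows' p.1.toNat)),
    pvPairs vepList delimeter (fun j => pvCols rows' j) M (fun j => by rw [pvCols_nil_iff, hMdef])]
  set pairs := (PySem.List.enumerate (vepList.take M)).map
    (fun p => (pvKey p.2, PySem.Str.join delimeter (pvCols rows' p.1.toNat))) with hpdef
  have hpfst : pairs.map Prod.fst = (vepList.take M).map pvKey := by
    rw [hpdef, List.map_map,
      show (Prod.fst ∘ fun (p : Int × String) =>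
        (pvKey p.2, PySem.Str.join delimeter (pvCols rows' p.1.toNat)))
        = pvKey ∘ (fun (p : Int × String) => p.2) from rfl,
      ← List.map_map, PySem.List.map_snd_enumerate]
  have hfresh : ∀ q ∈ pairs, base.contains q.1 = false := by
    intro q hq
    obtain ⟨p, hp, rfl⟩ := List.mem_map.mp hq
    obtain ⟨k, hk, rfl⟩ := (PySem.List.mem_enumerate_iff _ _ _).mp hp
    by_contra hcb
    have hc : base.contains (pvKey (vepList.take M)[k]) = true := by
      cases h : base.contains (pvKey (vepList.take M)[k])
      · exact absurd h hcb
      · rfl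
    exact HF _ (List.getElem_mem hk) ((PySem.Dict.contains_iff_mem_keys base _).mp hc)
  have hpnd : (pairs.map Prod.fst).Nodup := by
    rw [hpfst]
    exact hndM.map (fun _ _ h => pvKey_inj h)
  rw [show (fun (d : PySem.Dict String String) (q : String × String) => d.insert q.1 q.2)
      = (fun (d : PySem.Dict String String) (q : String × String) => d.insert (Prod.fst q) (Prod.snd q)) from rfl,
    PySem.Dict.items_foldl_insert_fresh pairs Prod.fst Prod.snd base hfresh hpnd]
  -- ===== assemble =====
  rw [PySem.Dict.items_eq_map_keys AD hkAnd "", hkeysA, List.map_append]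
  have hold : base.keys.map (fun k => (k, AD.getD k "")) = base.items := by
    have hmapeq : base.keys.map (fun k => (k, AD.getD k ""))
        = base.keys.map (fun k => (k, base.getD k "")) :=
      List.map_congr_left (fun k hk => by
        rw [PySem.Dict.getD_eq_get?_getD, hgetOld k hk, ← PySem.Dict.getD_eq_get?_getD])
    rw [hmapeq]
    exact (PySem.Dict.items_eq_map_keys base hbnodup "").symm
  have hnew : ((vepList.take M).map pvKey).map (fun k => (k, AD.getD k ""))
      = pairs.map (fun a => (a.1, a.2)) := by
    apply List.ext_getElem
    · simp [hpdef, PySem.List.length_enumerate]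
    · intro t ht1 ht2
      simp only [hpdef, List.getElem_map, PySem.List.getElem_enumerate]
      have ht : t < (vepList.take M).length := by
        simpa using ht1
      have htoNat : ((0 : Int) + (t : Int)).toNat = t := by omega
      rw [htoNat, PySem.Dict.getD_eq_get?_getD, hgetNew t ht]
      rfl
  rw [hold, hnew]
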